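-- pv_equiv track=rewrite | github.com/allbilly/libane | dump.py | format_sbs_compact_grouped
-- ===== SOURCE A (Python) =====
-- from collections import OrderedDict
-- from typing import List, Optional, Tuple
--
-- def format_sbs_compact_grouped(
--     words: List[int],
--     fields: List[Tuple[str, int, int, int, int]],
-- ) -> List[str]:
--     grouped: "OrderedDict[int, List[Tuple[str, int, int, int, int]]]" = OrderedDict()
--     for name, val, by, bi, sz in fields:
--         word_offset = (by // 8) * 8
--         grouped.setdefault(word_offset, []).append((name, val, by, bi, sz))
--     lines: List[str] = []
--     for word_offset in sorted(grouped.keys()):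
--         word_index = word_offset // 8
--         word = words[word_index] if 0 <= word_index < len(words) else 0
--         lines.append(f"[0x{word_offset:03x}] {word:016x}")
--         prefix_groups: "OrderedDict[str, List[Tuple[str, int, int, int]]]" = OrderedDict()
--         items = sorted(grouped[word_offset], key=lambda x: (x[2], x[3]))
--         for name, val, by, bi, sz in items:
--             if "." in name:
--                 prefix, field = name.rsplit(".", 1)
--             else:
--                 prefix, field = "other", name
--             prefix_groups.setdefault(prefix, []).append((field, val, by, bi, sz))
--         for prefix, plist in prefix_groups.items():
--             lines.append(f"  {prefix}{{")
--             for field, val, by, bi, sz in plist: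
--                 lines.append(f"    {field}={val} (b0x{by:x} bit{bi} w{sz})")
--             lines.append("  }")
--     return lines
-- ===== SOURCE B (Python) =====
-- def format_sbs_compact_grouped(words, fields):
--     def word_off(f):
--         return (f[2] // 8) * 8
--
--     def split_name(name):
--         return tuple(name.rsplit(".", 1)) if "." in name else ("other", name)
--
--     lines = []
--     for wo in sorted({word_off(f) for f in fields}):
--         wi = wo // 8
--         word = words[wi] if 0 <= wi < len(words) else 0
--         lines.append(f"[0x{wo:03x}] {word:016x}")
--         items = sorted((f for f in fields if word_off(f) == wo),
--                        key=lambda f: (f[2], f[3]))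
--         prefixes = list(dict.fromkeys(split_name(f[0])[0] for f in items))
--         for prefix in prefixes:
--             lines.append(f"  {prefix}{{")
--             for name, val, by, bi, sz in items:
--                 p, fld = split_name(name)
--                 if p == prefix:
--                     lines.append(f"    {fld}={val} (b0x{by:x} bit{bi} w{sz})")
--             lines.append("  }")
--     return lines
-- ===== Notes on version B (the rewrite author's own statement) =====
-- stated objective: alternative
-- what changed: B replaces both OrderedDict grouping passes by sorted(set(...))/ordered-dedup of the keys followed by a filter pass per key (outer: sorted set of word offsets instead of a grouping dict; inner: deduped prefix list instead of a prefix->list dict), so no per-key accumulated lists are ever built.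
import Mathlib
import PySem

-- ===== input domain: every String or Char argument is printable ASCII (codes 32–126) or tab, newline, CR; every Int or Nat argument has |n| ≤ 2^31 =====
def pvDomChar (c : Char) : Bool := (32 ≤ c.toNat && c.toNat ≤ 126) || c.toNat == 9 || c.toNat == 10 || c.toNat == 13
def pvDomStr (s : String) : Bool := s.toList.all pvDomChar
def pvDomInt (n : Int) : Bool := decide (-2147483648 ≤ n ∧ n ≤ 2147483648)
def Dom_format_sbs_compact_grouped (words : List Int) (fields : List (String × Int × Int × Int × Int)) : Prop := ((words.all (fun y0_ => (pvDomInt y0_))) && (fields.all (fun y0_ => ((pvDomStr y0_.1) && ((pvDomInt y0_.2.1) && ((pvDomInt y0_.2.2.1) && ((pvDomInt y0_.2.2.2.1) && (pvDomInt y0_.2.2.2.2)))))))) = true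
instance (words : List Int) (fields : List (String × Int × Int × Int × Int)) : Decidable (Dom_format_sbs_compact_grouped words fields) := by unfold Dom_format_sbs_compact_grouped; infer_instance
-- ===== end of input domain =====

-- B replaces the two OrderedDict grouping passes by sorted(set)/ordered-dedup of the keys plus one
-- filter pass per key (alternative decomposition, not claimed faster); return values proved equal.

-- ----- shared exact ports of the f-string pieces both Pythons build identically -----
-- format(n, 'x'): lowercase hex digits, '-' in front for negatives (Nat.toDigits 16 is exact for this)
def pyHexChars (n : Int) : List Char :=
  if n < 0 then '-' :: Nat.toDigits 16 (-n).toNat else Nat.toDigits 16 n.toNat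

-- format(n, '0<w>x'): zero-padded to width w, the sign stays in front (PySem.Chars.zfill is exact)
def pyHexPad (n : Int) (w : Int) : List Char := PySem.Chars.zfill (pyHexChars n) w

-- f"[0x{wo:03x}] {word:016x}"
def headerLine (wo word : Int) : String :=
  String.ofList ("[0x".toList ++ pyHexPad wo 3 ++ "] ".toList ++ pyHexPad word 16)

-- name.rsplit(".", 1) when "." in name, else ("other", name)  (exact hand port: split at the LAST '.')
def splitName (name : String) : String × String :=
  if name.toList.contains '.' then
    let rev := name.toList.reverse
    (String.ofList ((rev.dropWhile (· ≠ '.')).drop 1).reverse,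
     String.ofList (rev.takeWhile (· ≠ '.')).reverse)
  else ("other", name)

-- f"    {field}={val} (b0x{by:x} bit{bi} w{sz})"
def fieldLine (fld : String) (val by_ bi sz : Int) : String :=
  String.ofList ("    ".toList ++ fld.toList ++ ['='] ++ (PySem.Int.toStr val).toList
    ++ " (b0x".toList ++ pyHexChars by_ ++ " bit".toList ++ (PySem.Int.toStr bi).toList
    ++ " w".toList ++ (PySem.Int.toStr sz).toList ++ [')'])

-- f"  {prefix}{{"
def prefixOpen (p : String) : String := String.ofList ("  ".toList ++ p.toList ++ ['{'])

-- (by // 8) * 8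
def woOf (f : String × Int × Int × Int × Int) : Int := PySem.Int.floordiv f.2.2.1 8 * 8

-- ===== PORT A =====
def format_sbs_compact_grouped (words : List Int) (fields : List (String × Int × Int × Int × Int)) : List String :=
  let grouped : PySem.Dict Int (List (String × Int × Int × Int × Int)) :=
    fields.foldl (fun d f => d.modify (woOf f) [] (fun l => l ++ [f])) PySem.Dict.empty
  (PySem.List.sorted grouped.keys (fun k => k) false).foldl (fun lines wo =>
    let wi := PySem.Int.floordiv wo 8
    let word := if 0 ≤ wi ∧ wi < (words.length : Int) then words.getD wi.toNat 0 else 0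
    let lines := lines ++ [headerLine wo word]
    let items := PySem.List.sorted2 (grouped.getD wo []) (fun f => f.2.2.1) (fun f => f.2.2.2.1)
    let pg : PySem.Dict String (List (String × Int × Int × Int × Int)) :=
      items.foldl (fun d f =>
        d.modify (splitName f.1).1 [] (fun l => l ++ [((splitName f.1).2, f.2)])) PySem.Dict.empty
    pg.items.foldl (fun lines pr =>
      (pr.2.foldl (fun ls g => ls ++ [fieldLine g.1 g.2.1 g.2.2.1 g.2.2.2.1 g.2.2.2.2])
        (lines ++ [prefixOpen pr.1])) ++ ["  }"]) lines) []

-- ===== PORT B =====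
def format_sbs_compact_grouped_alt (words : List Int) (fields : List (String × Int × Int × Int × Int)) : List String :=
  (PySem.List.sorted (PySem.Set.ofList (fields.map woOf)) (fun k => k) false).foldl (fun lines wo =>
    let wi := PySem.Int.floordiv wo 8
    let word := if 0 ≤ wi ∧ wi < (words.length : Int) then words.getD wi.toNat 0 else 0
    let lines := lines ++ [headerLine wo word]
    let items := PySem.List.sorted2 (fields.filter (fun f => woOf f == wo))
      (fun f => f.2.2.1) (fun f => f.2.2.2.1)
    let prefixes := PySem.List.dedup (items.map (fun f => (splitName f.1).1))
    prefixes.foldl (fun lines p =>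
      (items.foldl (fun ls f =>
          if (splitName f.1).1 == p then
            ls ++ [fieldLine (splitName f.1).2 f.2.1 f.2.2.1 f.2.2.2.1 f.2.2.2.2]
          else ls)
        (lines ++ [prefixOpen p])) ++ ["  }"]) lines) []

-- ===== PRECONDITION & SPEC =====
def Spec_format_sbs_compact_grouped (words : List Int) (fields : List (String × Int × Int × Int × Int)) (out : List String) : Prop := out = format_sbs_compact_grouped_alt words fields
instance (words : List Int) (fields : List (String × Int × Int × Int × Int)) (out : List String) : Decidable (Spec_format_sbs_compact_grouped words fields out) := by unfold Spec_format_sbs_compact_grouped; infer_instance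

-- ===== CLAIM (what is proved, stated in full; the proofs are below) =====
def Claim_equal_format_sbs_compact_grouped : Prop := ∀ (words : List Int) (fields : List (String × Int × Int × Int × Int)), Dom_format_sbs_compact_grouped words fields → Spec_format_sbs_compact_grouped words fields (format_sbs_compact_grouped words fields)

-- ===== LEMMAS AND PROOFS =====

-- A's outer grouping dict, keyed/valued through an arbitrary-key fold, rewritten over pairs
theorem pv_foldl_modify_pairs {κ β : Type} [BEq κ] (l : List β) (k : β → κ) (d : PySem.Dict κ (List β)) :
    l.foldl (fun d f => d.modify (k f) [] (fun v => v ++ [f])) d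
      = (l.map (fun f => (k f, f))).foldl (fun d p => d.modify p.1 [] (fun v => v ++ [p.2])) d := by
  rw [List.foldl_map]

-- the keys of A's outer grouping dict are exactly set(map woOf fields), in first-appearance order
theorem pv_groupedA_keys (fields : List (String × Int × Int × Int × Int)) :
    (fields.foldl (fun d f => d.modify (woOf f) [] (fun l => l ++ [f]))
        (PySem.Dict.empty : PySem.Dict Int (List (String × Int × Int × Int × Int)))).keys
      = PySem.Set.ofList (fields.map woOf) := by
  have h := PySem.Dict.keys_foldl_modify_key fields woOf []
    (fun _ f => (fun l => l ++ [f])) (PySem.Dict.empty : PySem.Dict Int (List (String × Int × Int × Int × Int)))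
  simpa [PySem.Set.update_nil_left] using h

-- grouped[wo] is the sublist of fields with that word offset, in original order
theorem pv_groupedA_getD (fields : List (String × Int × Int × Int × Int)) (wo : Int) :
    (fields.foldl (fun d f => d.modify (woOf f) [] (fun l => l ++ [f]))
        (PySem.Dict.empty : PySem.Dict Int (List (String × Int × Int × Int × Int)))).getD wo []
      = fields.filter (fun f => woOf f == wo) := by
  rw [pv_foldl_modify_pairs fields woOf]
  rw [PySem.Dict.getD_foldl_modify_append]
  simp [List.filter_map, Function.comp_def]

-- per word block: A's prefix dict pass equals B's dedup-prefixes + filter pass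
theorem pv_inner_eq (items : List (String × Int × Int × Int × Int)) (lines : List String) :
    ((items.foldl (fun d f =>
        d.modify (splitName f.1).1 [] (fun l => l ++ [((splitName f.1).2, f.2)]))
        (PySem.Dict.empty : PySem.Dict String (List (String × Int × Int × Int × Int)))).items.foldl
      (fun lines pr =>
        (pr.2.foldl (fun ls g => ls ++ [fieldLine g.1 g.2.1 g.2.2.1 g.2.2.2.1 g.2.2.2.2])
          (lines ++ [prefixOpen pr.1])) ++ ["  }"]) lines)
    = (PySem.List.dedup (items.map (fun f => (splitName f.1).1))).foldl
        (fun lines p =>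
          (items.foldl (fun ls f =>
              if (splitName f.1).1 == p then
                ls ++ [fieldLine (splitName f.1).2 f.2.1 f.2.2.1 f.2.2.2.1 f.2.2.2.2]
              else ls)
            (lines ++ [prefixOpen p])) ++ ["  }"]) lines := by
  set pg := items.foldl (fun d f =>
      d.modify (splitName f.1).1 [] (fun l => l ++ [((splitName f.1).2, f.2)]))
      (PySem.Dict.empty : PySem.Dict String (List (String × Int × Int × Int × Int))) with hpg
  have hnd : pg.keys.Nodup := by
    apply PySem.Dict.nodup_keys_foldl_modify_key items (fun f => (splitName f.1).1) []
      (fun _ f => (fun l => l ++ [((splitName f.1).2, f.2)]))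
    simp
  have hkeys : pg.keys = PySem.Set.ofList (items.map (fun f => (splitName f.1).1)) := by
    have h := PySem.Dict.keys_foldl_modify_key items (fun f => (splitName f.1).1) []
      (fun _ f => (fun l => l ++ [((splitName f.1).2, f.2)]))
      (PySem.Dict.empty : PySem.Dict String (List (String × Int × Int × Int × Int)))
    simpa [PySem.Set.update_nil_left] using h
  have hgetD : ∀ p, pg.getD p [] = (items.filter (fun f => (splitName f.1).1 == p)).map
      (fun f => ((splitName f.1).2, f.2)) := by
    intro p
    rw [hpg]
    rw [show items.foldl (fun d f =>
          d.modify (splitName f.1).1 [] (fun l => l ++ [((splitName f.1).2, f.2)]))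
          (PySem.Dict.empty : PySem.Dict String (List (String × Int × Int × Int × Int)))
        = (items.map (fun f => ((splitName f.1).1, ((splitName f.1).2, f.2)))).foldl
          (fun d q => d.modify q.1 [] (fun l => l ++ [q.2]))
          (PySem.Dict.empty : PySem.Dict String (List (String × Int × Int × Int × Int)))
      from by rw [List.foldl_map]]
    rw [PySem.Dict.getD_foldl_modify_append]
    simp [List.filter_map, Function.comp_def]
  rw [PySem.Dict.items_eq_map_keys pg hnd [], List.foldl_map, hkeys,
    PySem.List.dedup_eq_ofList]
  apply PySem.List.foldl_congr_mem
  intro acc p _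
  rw [hgetD p, List.foldl_map, PySem.List.foldl_append_if
    (fun f => (splitName f.1).1 == p)
    (fun f => fieldLine (splitName f.1).2 f.2.1 f.2.2.1 f.2.2.2.1 f.2.2.2.2) items
    (acc ++ [prefixOpen p])]
  rw [PySem.List.foldl_append_singleton_eq_map]

-- ===== VERDICT (by name: the statement is the Claim_ definition above) =====
theorem format_sbs_compact_grouped_spec : Claim_equal_format_sbs_compact_grouped := by
  intro words fields _
  show format_sbs_compact_grouped words fields = format_sbs_compact_grouped_alt words fields
  simp only [format_sbs_compact_grouped, format_sbs_compact_grouped_alt]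
  rw [pv_groupedA_keys fields]
  apply PySem.List.foldl_congr_mem
  intro acc wo _
  simp only [pv_groupedA_getD fields wo]
  exact pv_inner_eq _ _
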